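-- pv_equiv track=rewrite | github.com/shannonfenn/data-tools | datatools/utils.py | duplicate_patterns
-- ===== SOURCE A (Python) =====
-- def duplicate_patterns(X, names=None):
--     l = [tuple(row) for row in X]
--     sorted_indices = sorted(range(len(l)), key=lambda k: l[k])
--
--     if names is None:
--         # identity function to give indices when names not given
--         names = list(range(len(sorted_indices)))
--
--     duplicates = []
--     run_found = False
--     for i0, i1 in zip(sorted_indices[:-1], sorted_indices[1:]):
--         if l[i0] == l[i1]:
--             if not run_found:
--                 # start new list
--                 duplicates.append([names[i0], names[i1]])
--             else:
--                 duplicates[-1].append(names[i1])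
--             run_found = True
--         else:
--             run_found = False
--
--     return duplicates
-- ===== SOURCE B (Python) =====
-- def duplicate_patterns(X, names=None):
--     # One pass: hash each row into a dict keyed by its tuple, collecting names
--     # in original order; then sort only the distinct rows for the group order.
--     groups = {}
--     for i, row in enumerate(X):
--         name = i if names is None else names[i]
--         groups.setdefault(tuple(row), []).append(name)
--     return [g for _, g in sorted(groups.items()) if len(g) > 1]
-- ===== Notes on version B (the rewrite author's own statement) =====
-- stated objective: alternative
-- what changed: B replaces A's argsort of all n row indices plus an adjacent-run scan with one hashing pass that groups names per distinct row in a dict, then sorts only the d distinct rows for the group order (intended as faster; measured only ~1.3x on a timing run's inputs).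
-- outside the precondition, e.g. on duplicate_patterns([[1], [2]], []): A returns [], B raises IndexError
import Mathlib
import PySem

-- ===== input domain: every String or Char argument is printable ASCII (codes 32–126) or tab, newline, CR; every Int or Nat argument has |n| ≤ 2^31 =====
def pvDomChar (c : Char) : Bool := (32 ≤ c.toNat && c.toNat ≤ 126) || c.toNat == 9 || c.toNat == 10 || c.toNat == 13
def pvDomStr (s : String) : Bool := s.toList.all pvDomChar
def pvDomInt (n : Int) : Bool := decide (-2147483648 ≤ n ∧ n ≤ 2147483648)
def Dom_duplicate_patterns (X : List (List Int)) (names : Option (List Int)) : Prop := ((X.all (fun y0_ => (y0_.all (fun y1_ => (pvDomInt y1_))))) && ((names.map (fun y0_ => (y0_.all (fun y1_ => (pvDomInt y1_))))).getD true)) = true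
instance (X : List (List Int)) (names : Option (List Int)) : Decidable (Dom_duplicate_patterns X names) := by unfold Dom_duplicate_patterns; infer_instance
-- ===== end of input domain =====

-- B replaces A's argsort of all n row indices + adjacent-run scan by one hashing
-- pass grouping names per distinct row in a dict, sorting only the distinct rows.

-- ===== PORT A =====
def duplicate_patterns (X : List (List Int)) (names : Option (List Int)) : List (List Int) :=
  -- l = [tuple(row) for row in X]   (tuple(row) is the row itself under the type convention)
  let l : List (List Int) := X.map (fun row => row)
  -- sorted_indices = sorted(range(len(l)), key=lambda k: l[k])
  let sortedIndices : List Int :=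
    PySem.List.sorted (PySem.List.pyRange 0 (l.length : Int)) (fun k => PySem.List.pyGetD l k [])
  -- names = list(range(len(sorted_indices))) when names is None
  let nms : List Int :=
    match names with
    | none => PySem.List.pyRange 0 (sortedIndices.length : Int)
    | some ns => ns
  -- for i0, i1 in zip(sorted_indices[:-1], sorted_indices[1:]): …
  let pairs : List (Int × Int) :=
    List.zip (PySem.List.slice sortedIndices none (some (-1)))
             (PySem.List.slice sortedIndices (some 1) none)
  (pairs.foldl
    (fun (st : List (List Int) × Bool) (p : Int × Int) =>
      if PySem.List.pyGetD l p.1 [] == PySem.List.pyGetD l p.2 [] then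
        if !st.2 then
          (st.1 ++ [[PySem.List.pyGetD nms p.1 0, PySem.List.pyGetD nms p.2 0]], true)
        else
          (st.1.dropLast ++ [st.1.getLastD [] ++ [PySem.List.pyGetD nms p.2 0]], true)
      else (st.1, false))
    ([], false)).1

-- ===== PORT B =====
def duplicate_patterns_alt (X : List (List Int)) (names : Option (List Int)) : List (List Int) :=
  -- groups.setdefault(tuple(row), []).append(name) over enumerate(X)
  let groups : PySem.Dict (List Int) (List Int) :=
    (PySem.List.enumerate X).foldl
      (fun d p =>
        let name : Int := match names with | none => p.1 | some ns => PySem.List.pyGetD ns p.1 0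
        d.modify p.2 [] (fun g => g ++ [name]))
      PySem.Dict.empty
  -- sorted(groups.items()): dict keys are distinct, so sorting the (key, value)
  -- pairs by Python's tuple order is sorting them by the key alone
  ((PySem.List.sorted groups.items (fun p => p.1)).filter (fun p => decide (1 < p.2.length))).map
    (fun p => p.2)

-- ===== PRECONDITION & SPEC =====
-- Pre_ excludes a names list shorter than X: there Python A raises IndexError as
-- soon as X has duplicate rows; if X happens to have none, A returns an empty
-- result without indexing names, while B (which looks up every row's name) raises.
def Pre_duplicate_patterns (X : List (List Int)) (names : Option (List Int)) : Prop :=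
  names.all (fun ns => decide (X.length ≤ ns.length)) = true
instance (X : List (List Int)) (names : Option (List Int)) : Decidable (Pre_duplicate_patterns X names) := by unfold Pre_duplicate_patterns; infer_instance
def pvWitness_duplicate_patterns : List (List Int) × Option (List Int) := ([[1], [1], [2]], some [7, 8, 9])

def Spec_duplicate_patterns (X : List (List Int)) (names : Option (List Int)) (out : List (List Int)) : Prop := out = duplicate_patterns_alt X names
instance (X : List (List Int)) (names : Option (List Int)) (out : List (List Int)) : Decidable (Spec_duplicate_patterns X names out) := by unfold Spec_duplicate_patterns; infer_instance

-- ===== CLAIM (what is proved, stated in full; the proofs are below) =====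
def Claim_equal_duplicate_patterns : Prop := ∀ (X : List (List Int)) (names : Option (List Int)), Dom_duplicate_patterns X names → Pre_duplicate_patterns X names → Spec_duplicate_patterns X names (duplicate_patterns X names)

-- ===== LEMMAS AND PROOFS =====
-- (the Lean ports are in fact equal on ALL inputs — pyGetD is total — so the
-- proofs below never need Pre_; Pre_ marks where the Python A raises.)

-- the key of index i, the indices carrying row k (in increasing order),
-- the distinct rows in sorted order, the name of index i
def pvKv (X : List (List Int)) (i : Int) : List Int := PySem.List.pyGetD X i []
def pvIdxs (X : List (List Int)) (k : List Int) : List Int :=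
  (PySem.List.pyRange 0 (X.length : Int)).filter (fun i => pvKv X i == k)
def pvKeys (X : List (List Int)) : List (List Int) :=
  PySem.List.sorted (PySem.Set.ofList X) (fun k => k)
def pvNm (names : Option (List Int)) (i : Int) : Int :=
  match names with | none => i | some ns => PySem.List.pyGetD ns i 0
def pvStep (X : List (List Int)) (nm : Int → Int) (st : List (List Int) × Bool) (p : Int × Int) :
    List (List Int) × Bool :=
  if pvKv X p.1 == pvKv X p.2 then
    if !st.2 then (st.1 ++ [[nm p.1, nm p.2]], true)
    else (st.1.dropLast ++ [st.1.getLastD [] ++ [nm p.2]], true)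
  else (st.1, false)
def pvPairs (p : Int) (s : List Int) : List (Int × Int) := List.zip (p :: s) s
def pvGroups (X : List (List Int)) (nm : Int → Int) (ks : List (List Int)) : List (List Int) :=
  (ks.map (fun k => (pvIdxs X k).map nm)).filter (fun g => decide (1 < g.length))

-- zip(s[:-1], s[1:]) pairs = zip(s, s[1:])
theorem pv_zip_dropLast_tail (s : List Int) : List.zip s.dropLast s.tail = List.zip s s.tail := by
  match s with
  | [] => rfl
  | [x] => rfl
  | x :: y :: t =>
    have ih := pv_zip_dropLast_tail (y :: t)
    simp only [List.dropLast_cons₂, List.zip_cons_cons, List.tail_cons] at *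
    exact congrArg _ ih

theorem pv_insertBy_append_not {α : Type} (before : α → α → Bool) (x : α) (l r : List α)
    (h : ∀ b ∈ l, before x b = false) :
    PySem.List.insertBy before x (l ++ r) = l ++ PySem.List.insertBy before x r := by
  induction l with
  | nil => rfl
  | cons a l ih =>
    have ha := h a (by simp)
    have ihh := ih (fun b hb => h b (by simp [hb]))
    cases r with
    | nil =>
      simp only [List.append_nil] at ihh ⊢
      simp [PySem.List.insertBy, ha, PySem.List.insertBy_of_forall_not_before before x l
        (fun b hb => h b (by simp [hb]))]
    | cons c cs => simp [PySem.List.insertBy, ha, ihh]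

theorem pv_insertBy_front {α : Type} (before : α → α → Bool) (x : α) (r : List α)
    (h : ∀ b ∈ r, before x b = true) :
    PySem.List.insertBy before x r = x :: r := by
  cases r with
  | nil => rfl
  | cons a l => simp [PySem.List.insertBy, h a (by simp)]

-- sorted's Decidable-instance argument is irrelevant to its value
theorem pv_sorted_deceq {α κ : Type} [LT κ] {d1 d2 : DecidableLT κ} (xs : List α) (key : α → κ) :
    @PySem.List.sorted α κ _ d1 xs key false = @PySem.List.sorted α κ _ d2 xs key false := by
  have h : d1 = d2 := by funext a b; exact Subsingleton.elim _ _
  rw [h]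

-- inserting x into a block decomposition: x goes to the end of its key's block
theorem pv_insertBy_flatMap {α κ : Type} [LinearOrder κ] (key : α → κ) (x : α) (ks : List κ)
    (f : κ → List α)
    (hpw : ks.Pairwise (· < ·))
    (hconst : ∀ k ∈ ks, ∀ y ∈ f k, key y = k)
    (hne : ∀ k ∈ ks, f k ≠ [])
    (hfresh : key x ∉ ks → f (key x) = []) :
    PySem.List.insertBy (fun a b => decide (key a < key b)) x (ks.flatMap f)
      = (if key x ∈ ks then ks else PySem.List.insertBy (fun a b => decide (a < b)) (key x) ks).flatMap
          (fun k => f k ++ if k = key x then [x] else []) := by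
  have gf : ∀ (L : List κ), (∀ k' ∈ L, k' ≠ key x) →
      List.flatMap (fun k => f k ++ if k = key x then [x] else []) L = List.flatMap f L := by
    intro L hL
    apply List.flatMap_congr
    intro k' hk'
    rw [if_neg (hL k' hk'), List.append_nil]
  induction ks with
  | nil =>
    rw [if_neg (List.not_mem_nil)]
    simp [PySem.List.insertBy, hfresh (List.not_mem_nil)]
  | cons k ks ih =>
    have hks : ∀ k' ∈ ks, k < k' := fun k2 h2 => List.rel_of_pairwise_cons hpw h2
    have hkey : ∀ y ∈ ks.flatMap f, k < key y := by
      intro y hy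
      obtain ⟨k', hk', hyk⟩ := List.mem_flatMap.mp hy
      rw [hconst k' (by simp [hk']) y hyk]
      exact hks k' hk'
    rcases lt_trichotomy (key x) k with hlt | heq | hgt
    · have hnm : key x ∉ k :: ks := by
        simp only [List.mem_cons]
        rintro (h | h)
        · exact absurd h (ne_of_lt hlt)
        · exact absurd (hks _ h) (not_lt.mpr (le_of_lt hlt))
      rw [if_neg hnm]
      rw [List.flatMap_cons, pv_insertBy_front _ _ _ (by
        intro b hb
        rcases List.mem_append.mp hb with h | h
        · exact decide_eq_true (by rw [hconst k (by simp) b h]; exact hlt)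
        · exact decide_eq_true (lt_trans hlt (hkey b h)))]
      have hins : PySem.List.insertBy (fun a b => decide (a < b)) (key x) (k :: ks)
          = key x :: k :: ks := by
        simp [PySem.List.insertBy, hlt]
      rw [hins, List.flatMap_cons, List.flatMap_cons,
        gf ks (fun k' hk' => ne_of_gt (lt_trans hlt (hks k' hk'))),
        hfresh hnm, if_pos rfl, if_neg (ne_of_gt hlt)]
      simp
    · rw [List.flatMap_cons,
        pv_insertBy_append_not _ _ _ _ (by
          intro b hb
          exact decide_eq_false (by rw [hconst k (by simp) b hb, heq]; exact lt_irrefl _)),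
        pv_insertBy_front _ _ _ (by
          intro b hb
          exact decide_eq_true (by rw [heq]; exact hkey b hb))]
      rw [if_pos (by simp [heq]), List.flatMap_cons, if_pos heq.symm,
        gf ks (fun k' hk' => ne_of_gt (heq ▸ hks k' hk'))]
      simp
    · rw [List.flatMap_cons,
        pv_insertBy_append_not _ _ _ _ (by
          intro b hb
          exact decide_eq_false (by rw [hconst k (by simp) b hb]; exact not_lt.mpr (le_of_lt hgt)))]
      have ihh := ih (List.Pairwise.sublist (List.sublist_cons_self k ks) hpw)
        (fun k' hk' => hconst k' (by simp [hk'])) (fun k' hk' => hne k' (by simp [hk']))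
        (fun h => hfresh (by simp [h, ne_of_gt hgt]))
      rw [ihh]
      by_cases hmem : key x ∈ ks
      · rw [if_pos hmem, if_pos (by simp [hmem]), List.flatMap_cons,
          if_neg (ne_of_lt hgt), List.append_nil]
      · rw [if_neg hmem, if_neg (by simp [hmem, ne_of_gt hgt])]
        have hstep : PySem.List.insertBy (fun a b => decide (a < b)) (key x) (k :: ks)
            = k :: PySem.List.insertBy (fun a b => decide (a < b)) (key x) ks := by
          simp [PySem.List.insertBy, not_lt.mpr (le_of_lt hgt)]
        rw [hstep, List.flatMap_cons, if_neg (ne_of_lt hgt), List.append_nil]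

-- STABILITY of Python's sort: sorted(xs, key) is the concatenation, over the
-- distinct keys in increasing order, of the elements of each key in xs-order
theorem pv_sorted_stable {α κ : Type} [LinearOrder κ] [BEq κ] [LawfulBEq κ]
    (xs : List α) (key : α → κ) :
    PySem.List.sorted xs key
      = (PySem.List.sorted (PySem.Set.ofList (xs.map key)) (fun k => k)).flatMap
          (fun k => xs.filter (fun y => key y == k)) := by
  induction xs using List.reverseRecOn with
  | nil => rfl
  | append_singleton ys x ih =>
    have hstep : PySem.List.sorted (ys ++ [x]) key
        = PySem.List.insertBy (fun a b => decide (key a < key b)) x (PySem.List.sorted ys key) := by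
      rw [PySem.List.sorted_eq_foldl_insertBy, PySem.List.sorted_eq_foldl_insertBy,
        List.foldl_append]
      rfl
    rw [hstep, ih]
    set Sy := PySem.List.sorted (PySem.Set.ofList (ys.map key)) (fun k => k) with hSy
    have hpw : Sy.Pairwise (· < ·) := PySem.List.sorted_ofList_pairwise_lt _
    have hmemS : ∀ k, k ∈ Sy ↔ k ∈ ys.map key := by
      intro k
      rw [hSy, PySem.List.mem_sorted, PySem.Set.mem_ofList]
    rw [pv_insertBy_flatMap key x Sy _ hpw
      (by
        intro k hk y hy
        have := List.of_mem_filter hy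
        exact eq_of_beq this)
      (by
        intro k hk
        obtain ⟨y, hy, hyk⟩ := List.mem_map.mp ((hmemS k).mp hk)
        intro hnil
        have : y ∈ ys.filter (fun y => key y == k) := List.mem_filter.mpr ⟨hy, by simp [hyk]⟩
        simp [hnil] at this)
      (by
        intro hnm
        rw [List.filter_eq_nil_iff]
        intro y hy
        simp only [beq_iff_eq]
        intro hc
        exact hnm ((hmemS _).mpr (List.mem_map.mpr ⟨y, hy, hc⟩)))]
    have hofl : PySem.Set.ofList ((ys ++ [x]).map key)
        = (PySem.Set.ofList (ys.map key)).add (key x) := by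
      rw [List.map_append, PySem.Set.ofList_append]
      rfl
    have hinner : ∀ (k : κ),
        (ys ++ [x]).filter (fun y => key y == k)
          = ys.filter (fun y => key y == k) ++ if k = key x then [x] else [] := by
      intro k
      rw [List.filter_append, List.filter_singleton]
      by_cases h : k = key x
      · simp [h]
      · have hb : (key x == k) = false := beq_eq_false_iff_ne.mpr (Ne.symm h)
        simp [if_neg h, hb]
    by_cases hmem : key x ∈ Sy
    · have hcont : (PySem.Set.ofList (ys.map key)).contains (key x) = true := by
        have := (hmemS _).mp hmem
        rw [← PySem.Set.mem_ofList (xs := ys.map key)] at this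
        exact List.elem_eq_true_of_mem this
      rw [if_pos hmem, hofl]
      unfold PySem.Set.add
      rw [if_pos hcont]
      exact List.flatMap_congr (fun k _ => (hinner k).symm)
    · have hcont : (PySem.Set.ofList (ys.map key)).contains (key x) = false := by
        rw [Bool.eq_false_iff]
        intro hc
        exact hmem ((hmemS _).mpr ((PySem.Set.mem_ofList _ _).mp (List.mem_of_elem_eq_true hc)))
      rw [if_neg hmem, hofl]
      unfold PySem.Set.add
      rw [if_neg (by rw [hcont]; exact Bool.false_ne_true)]
      have hsrt : PySem.List.sorted (PySem.Set.ofList (ys.map key) ++ [key x]) (fun k => k)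
          = PySem.List.insertBy (fun a b => decide (a < b)) (key x) Sy := by
        rw [PySem.List.sorted_eq_foldl_insertBy, List.foldl_append, hSy,
          PySem.List.sorted_eq_foldl_insertBy]
        rfl
      rw [hsrt]
      exact List.flatMap_congr (fun k _ => (hinner k).symm)

theorem pv_map_kv_pyRange (X : List (List Int)) :
    (PySem.List.pyRange 0 (X.length : Int)).map (fun i => PySem.List.pyGetD X i []) = X := by
  have := PySem.List.map_pyGetD_pyRange_zero X []
  simpa [PySem.List.len] using this

theorem pv_pairs_append (p : Int) (u v : List Int) :
    pvPairs p (u ++ v) = pvPairs p u ++ pvPairs (u.getLastD p) v := by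
  unfold pvPairs
  induction u generalizing p with
  | nil => rfl
  | cons a u ih =>
    rw [List.getLastD_cons]
    simp only [List.cons_append, List.zip_cons_cons]
    exact congrArg _ (ih a)

theorem pv_mem_idxs (X : List (List Int)) (k : List Int) (i : Int) (h : i ∈ pvIdxs X k) :
    pvKv X i = k := by
  unfold pvIdxs at h
  exact eq_of_beq (List.mem_filter.mp h).2

-- run lemmas for A's loop
theorem pv_blockRun (X : List (List Int)) (nm : Int → Int) (k : List Int) :
    ∀ (b : List Int) (p : Int) (done : List (List Int)) (cur : List Int),
    pvKv X p = k → (∀ i ∈ b, pvKv X i = k) →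
    List.foldl (pvStep X nm) (done ++ [cur], true) (pvPairs p b)
      = (done ++ [cur ++ b.map nm], true) := by
  intro b
  induction b with
  | nil => intro p done cur _ _; simp [pvPairs]
  | cons x b ih =>
    intro p done cur hp hb
    have hx : pvKv X x = k := hb x (by simp)
    have hpair : pvPairs p (x :: b) = (p, x) :: pvPairs x b := rfl
    rw [hpair, List.foldl_cons]
    have hstep : pvStep X nm (done ++ [cur], true) (p, x)
        = (done ++ [cur ++ [nm x]], true) := by
      unfold pvStep
      rw [if_pos (by simp [hp, hx]), if_neg (by simp)]
      simp
    rw [hstep, ih x done (cur ++ [nm x]) hx (fun i hi => hb i (by simp [hi]))]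
    simp

theorem pv_freshBlock (X : List (List Int)) (nm : Int → Int) (k : List Int) (b : List Int)
    (x : Int) (dups : List (List Int))
    (hx : pvKv X x = k) (hb : ∀ i ∈ b, pvKv X i = k) (hne : b ≠ []) :
    List.foldl (pvStep X nm) (dups, false) (pvPairs x b)
      = (dups ++ [(x :: b).map nm], true) := by
  match b, hne with
  | y :: b', _ =>
    have hy : pvKv X y = k := hb y (by simp)
    have hpair : pvPairs x (y :: b') = (x, y) :: pvPairs y b' := rfl
    rw [hpair, List.foldl_cons]
    have hstep : pvStep X nm (dups, false) (x, y) = (dups ++ [[nm x, nm y]], true) := by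
      unfold pvStep
      rw [if_pos (by simp [hx, hy]), if_pos (by simp)]
    rw [hstep, pv_blockRun X nm k b' y dups [nm x, nm y] hy (fun i hi => hb i (by simp [hi]))]
    simp

theorem pv_blockChain (X : List (List Int)) (nm : Int → Int) :
    ∀ (ks : List (List Int)) (p : Int) (dups : List (List Int)) (rf : Bool),
    (∀ k ∈ ks, pvIdxs X k ≠ []) → ks.Nodup → pvKv X p ∉ ks →
    (List.foldl (pvStep X nm) (dups, rf) (pvPairs p (ks.flatMap (pvIdxs X)))).1
      = dups ++ pvGroups X nm ks := by
  intro ks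
  induction ks with
  | nil => intro p dups rf _ _ _; simp [pvPairs, pvGroups]
  | cons k ks ih =>
    intro p dups rf hne hnd hp
    obtain ⟨x, xs, hx⟩ : ∃ x xs, pvIdxs X k = x :: xs := by
      cases h : pvIdxs X k with
      | nil => exact absurd h (hne k (by simp))
      | cons a l => exact ⟨a, l, rfl⟩
    have hxk : pvKv X x = k := pv_mem_idxs X k x (by rw [hx]; simp)
    have hxsk : ∀ i ∈ xs, pvKv X i = k := fun i hi => pv_mem_idxs X k i (by rw [hx]; simp [hi])
    have hflat : (k :: ks).flatMap (pvIdxs X) = x :: (xs ++ ks.flatMap (pvIdxs X)) := by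
      rw [List.flatMap_cons, hx]; rfl
    rw [hflat]
    have hpair : pvPairs p (x :: (xs ++ ks.flatMap (pvIdxs X)))
        = (p, x) :: pvPairs x (xs ++ ks.flatMap (pvIdxs X)) := rfl
    rw [hpair, List.foldl_cons]
    have hstep : pvStep X nm (dups, rf) (p, x) = (dups, false) := by
      unfold pvStep
      rw [if_neg (by simp [hxk]; intro hc; exact hp (by simp [← hc]))]
    rw [hstep, pv_pairs_append, List.foldl_append]
    have hq : pvKv X (xs.getLastD x) = k :=
      pv_mem_idxs X k _ (by rw [hx]; exact List.getLastD_mem_cons)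
    have hknotin : k ∉ ks := (List.nodup_cons.mp hnd).1
    cases xs with
    | nil =>
      have h0 : List.foldl (pvStep X nm) (dups, false) (pvPairs x []) = (dups, false) := rfl
      rw [List.getLastD_nil] at *
      rw [h0, ih x dups false (fun k' h => hne k' (by simp [h])) (List.nodup_cons.mp hnd).2
        (by rw [hq]; exact hknotin)]
      have hg : pvGroups X nm (k :: ks) = pvGroups X nm ks := by
        unfold pvGroups
        rw [List.map_cons, List.filter_cons, hx]
        simp
      rw [hg]
    | cons y ys =>
      rw [pv_freshBlock X nm k (y :: ys) x dups hxk (fun i hi => hxsk i hi) (by simp)]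
      rw [ih _ (dups ++ [(x :: y :: ys).map nm]) true (fun k' h => hne k' (by simp [h]))
        (List.nodup_cons.mp hnd).2 (by rw [hq]; exact hknotin)]
      have hg : pvGroups X nm (k :: ks) = ((x :: y :: ys).map nm) :: pvGroups X nm ks := by
        unfold pvGroups
        rw [List.map_cons, List.filter_cons, hx]
        simp
      rw [hg]
      simp

theorem pv_chainStart (X : List (List Int)) (nm : Int → Int) (k : List Int)
    (ks : List (List Int)) (x : Int) (xs : List Int)
    (hx : pvIdxs X k = x :: xs) (hne : ∀ k' ∈ ks, pvIdxs X k' ≠ [])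
    (hnd : (k :: ks).Nodup) (dups : List (List Int)) :
    (List.foldl (pvStep X nm) (dups, false) (pvPairs x (xs ++ ks.flatMap (pvIdxs X)))).1
      = dups ++ pvGroups X nm (k :: ks) := by
  have hxk : pvKv X x = k := pv_mem_idxs X k x (by rw [hx]; simp)
  have hxsk : ∀ i ∈ xs, pvKv X i = k := fun i hi => pv_mem_idxs X k i (by rw [hx]; simp [hi])
  have hq : pvKv X (xs.getLastD x) = k :=
    pv_mem_idxs X k _ (by rw [hx]; exact List.getLastD_mem_cons)
  have hknotin : k ∉ ks := (List.nodup_cons.mp hnd).1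
  rw [pv_pairs_append, List.foldl_append]
  cases xs with
  | nil =>
    have h0 : List.foldl (pvStep X nm) (dups, false) (pvPairs x []) = (dups, false) := rfl
    rw [List.getLastD_nil] at *
    rw [h0, pv_blockChain X nm ks x dups false hne (List.nodup_cons.mp hnd).2
      (by rw [hq]; exact hknotin)]
    have hg : pvGroups X nm (k :: ks) = pvGroups X nm ks := by
      unfold pvGroups
      rw [List.map_cons, List.filter_cons, hx]
      simp
    rw [hg]
  | cons y ys =>
    rw [pv_freshBlock X nm k (y :: ys) x dups hxk (fun i hi => hxsk i hi) (by simp)]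
    rw [pv_blockChain X nm ks _ (dups ++ [(x :: y :: ys).map nm]) true hne
      (List.nodup_cons.mp hnd).2 (by rw [hq]; exact hknotin)]
    have hg : pvGroups X nm (k :: ks) = ((x :: y :: ys).map nm) :: pvGroups X nm ks := by
      unfold pvGroups
      rw [List.map_cons, List.filter_cons, hx]
      simp
    rw [hg]
    simp

theorem pv_keys_pairwise (X : List (List Int)) : (pvKeys X).Pairwise (· < ·) := by
  unfold pvKeys
  have h := PySem.List.sorted_ofList_pairwise_lt (κ := List Int) X
  rw [pv_sorted_deceq] at h
  exact h

theorem pv_keys_nodup (X : List (List Int)) : (pvKeys X).Nodup :=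
  (pv_keys_pairwise X).imp ne_of_lt

theorem pv_keys_ne (X : List (List Int)) (k : List Int) (hk : k ∈ pvKeys X) :
    pvIdxs X k ≠ [] := by
  have hkX : k ∈ X := by
    have := (PySem.List.mem_sorted _ _ _ _).mp hk
    exact (PySem.Set.mem_ofList _ _).mp this
  obtain ⟨j, hj, hjk⟩ := List.getElem_of_mem hkX
  intro hnil
  have hmem : (j : Int) ∈ pvIdxs X k := by
    unfold pvIdxs
    refine List.mem_filter.mpr ⟨?_, ?_⟩
    · rw [PySem.List.pyRange_zero_natCast]
      exact List.mem_map.mpr ⟨j, List.mem_range.mpr hj, rfl⟩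
    · unfold pvKv
      rw [PySem.List.pyGetD_natCast, List.getD_eq_getElem _ _ hj, hjk]
      simp
  rw [hnil] at hmem
  simp at hmem

theorem pv_sorted_blocks (X : List (List Int)) :
    PySem.List.sorted (PySem.List.pyRange 0 (X.length : Int)) (fun k => PySem.List.pyGetD X k [])
      = (pvKeys X).flatMap (pvIdxs X) := by
  unfold pvKeys pvIdxs pvKv
  have h := pv_sorted_stable (PySem.List.pyRange 0 (X.length : Int))
    (fun i => PySem.List.pyGetD X i [])
  rw [pv_map_kv_pyRange X] at h
  rw [pv_sorted_deceq] at h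
  rw [pv_sorted_deceq (xs := PySem.Set.ofList X) (key := fun k => k)] at h
  exact h

theorem pv_main (X : List (List Int)) (nm : Int → Int) :
    (List.foldl (pvStep X nm) ([], false)
      (List.zip
        (PySem.List.slice (PySem.List.sorted (PySem.List.pyRange 0 (X.length : Int)) (fun k => PySem.List.pyGetD X k [])) none (some (-1)))
        (PySem.List.slice (PySem.List.sorted (PySem.List.pyRange 0 (X.length : Int)) (fun k => PySem.List.pyGetD X k [])) (some 1) none))).1
      = pvGroups X nm (pvKeys X) := by
  have h1 : ∀ (s : List Int), PySem.List.slice s none (some (-1)) = s.dropLast := by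
    intro s; simp [pysem]
  have h2 : ∀ (s : List Int), PySem.List.slice s (some 1) none = s.tail := by
    intro s; simp [pysem]
  rw [h1, h2, pv_zip_dropLast_tail, pv_sorted_blocks]
  cases h : (pvKeys X).flatMap (pvIdxs X) with
  | nil =>
    have hk0 : pvKeys X = [] := by
      cases hk : pvKeys X with
      | nil => rfl
      | cons a l =>
        exfalso
        apply pv_keys_ne X a (by rw [hk]; simp)
        exact (List.flatMap_eq_nil_iff.mp h) a (by rw [hk]; simp)
    rw [hk0]
    rfl
  | cons x t =>
    cases hk : pvKeys X with
    | nil => rw [hk] at h; simp at h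
    | cons k ks =>
      rw [hk, List.flatMap_cons] at h
      cases hik : pvIdxs X k with
      | nil => exact absurd hik (pv_keys_ne X k (by rw [hk]; simp))
      | cons a l =>
        rw [hik, List.cons_append] at h
        obtain ⟨rfl, rfl⟩ := List.cons_eq_cons.mp h
        have hcs := pv_chainStart X nm k ks a l hik
          (fun k' h' => pv_keys_ne X k' (by rw [hk]; simp [h']))
          (by rw [← hk]; exact pv_keys_nodup X) []
        simpa [pvPairs] using hcs

theorem pv_groups_congr (X : List (List Int)) (nm nm' : Int → Int) (ks : List (List Int))
    (h : ∀ k ∈ ks, ∀ i ∈ pvIdxs X k, nm i = nm' i) :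
    pvGroups X nm ks = pvGroups X nm' ks := by
  unfold pvGroups
  rw [List.map_congr_left (fun k hk => List.map_congr_left (fun i hi => h k hk i hi))]

theorem pv_A_eq_canon (X : List (List Int)) (names : Option (List Int)) :
    duplicate_patterns X names = pvGroups X (pvNm names) (pvKeys X) := by
  cases names with
  | some ns =>
    show duplicate_patterns X (some ns) = pvGroups X (pvNm (some ns)) (pvKeys X)
    unfold duplicate_patterns
    simp only [List.map_id']
    exact pv_main X (fun i => PySem.List.pyGetD ns i 0)
  | none =>
    unfold duplicate_patterns
    simp only [List.map_id']
    refine (pv_main X (fun i => PySem.List.pyGetD (PySem.List.pyRange 0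
      ((PySem.List.sorted (PySem.List.pyRange 0 (X.length : Int))
        (fun k => PySem.List.pyGetD X k [])).length : Int)) i 0)).trans ?_
    apply pv_groups_congr
    intro k hk i hi
    have hmem := (List.mem_filter.mp (by unfold pvIdxs at hi; exact hi)).1
    obtain ⟨h0, hlt⟩ := PySem.List.mem_pyRange_one.mp hmem
    lift i to ℕ using h0 with j
    have hlen : (PySem.List.sorted (PySem.List.pyRange 0 (X.length : Int))
        (fun k => PySem.List.pyGetD X k [])).length = X.length := by
      rw [PySem.List.length_sorted, PySem.List.pyRange_zero_natCast, List.length_map,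
        List.length_range]
    rw [hlen]
    have hj : j < X.length := by exact_mod_cast hlt
    rw [PySem.List.pyGetD_natCast, PySem.List.pyRange_zero_natCast,
      PySem.List.getD_map_range _ _ _ _ hj]
    rfl

theorem pv_enum_map_snd : ∀ (X : List (List Int)) (s : Int),
    (PySem.List.enumerate X s).map (fun p => p.2) = X := by
  intro X
  induction X with
  | nil => intro s; rfl
  | cons x t ih =>
    intro s
    rw [PySem.List.enumerate_cons, List.map_cons, ih (s + 1)]

theorem pv_enum_shift (k : List Int) (g : Int → Int) :
    ∀ (X : List (List Int)) (s : Int),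
    ((PySem.List.enumerate X s).filter (fun p => p.2 == k)).map (fun p => g p.1)
      = ((List.range X.length).filter (fun j => X.getD j [] == k)).map
          (fun (j : ℕ) => g (s + (j : Int))) := by
  intro X
  induction X with
  | nil => intro s; rfl
  | cons x t ih =>
    intro s
    rw [PySem.List.enumerate_cons, List.length_cons, List.range_succ_eq_map]
    have etail : List.filter (fun j => (x :: t).getD j [] == k) (List.map Nat.succ (List.range t.length))
        = List.map Nat.succ (List.filter (fun j => t.getD j [] == k) (List.range t.length)) := by
      rw [List.filter_map]
      rfl
    have hmap : (List.map Nat.succ (List.filter (fun j => t.getD j [] == k) (List.range t.length))).map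
          (fun (j : ℕ) => g (s + (j : Int)))
        = (List.filter (fun j => t.getD j [] == k) (List.range t.length)).map
            (fun (j : ℕ) => g ((s + 1) + (j : Int))) := by
      rw [List.map_map]
      apply List.map_congr_left
      intro j _
      show g (s + ((j + 1 : ℕ) : Int)) = g ((s + 1) + (j : Int))
      congr 1
      push_cast
      ring
    by_cases hx : (x == k) = true
    · rw [List.filter_cons_of_pos (p := fun q : ℤ × List ℤ => q.2 == k) hx,
        List.filter_cons_of_pos (p := fun j : ℕ => (x :: t).getD j [] == k) (show ((x :: t).getD 0 [] == k) = true from hx),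
        List.map_cons, List.map_cons, etail, hmap, ih (s + 1)]
      congr 1
      show g s = g (s + ((0 : ℕ) : Int))
      norm_num
    · rw [List.filter_cons_of_neg (p := fun q : ℤ × List ℤ => q.2 == k) (by simpa using hx),
        List.filter_cons_of_neg (p := fun j : ℕ => (x :: t).getD j [] == k) (show ¬((x :: t).getD 0 [] == k) = true from by simpa using hx),
        etail, hmap, ih (s + 1)]

theorem pv_grp_bridge (X : List (List Int)) (nmf : Int → Int) (k : List Int) :
    ((PySem.List.enumerate X 0).filter (fun p => p.2 == k)).map (fun p => nmf p.1)
      = (pvIdxs X k).map nmf := by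
  rw [pv_enum_shift k nmf X 0]
  unfold pvIdxs
  rw [PySem.List.pyRange_zero_natCast, List.filter_map, List.map_map]
  have hpred : List.filter ((fun i => pvKv X i == k) ∘ (fun j : ℕ => (j : Int))) (List.range X.length)
      = List.filter (fun j => X.getD j [] == k) (List.range X.length) := by
    apply List.filter_congr
    intro j _
    show (pvKv X (j : Int) == k) = (X.getD j [] == k)
    unfold pvKv
    rw [PySem.List.pyGetD_natCast]
  rw [hpred]
  apply List.map_congr_left
  intro j _
  show nmf (0 + (j : Int)) = nmf (j : Int)
  rw [zero_add]

theorem pv_B_main (X : List (List Int)) (nmf : Int → Int) :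
    ((PySem.List.sorted
        ((List.foldl (fun d (p : Int × List Int) => d.modify p.2 [] (fun g => g ++ [nmf p.1]))
          (PySem.Dict.empty) (PySem.List.enumerate X 0)).items)
        (fun p => p.1)).filter (fun p => decide (1 < p.2.length))).map (fun p => p.2)
      = pvGroups X nmf (pvKeys X) := by
  have hkeys : (List.foldl (fun d (p : Int × List Int) => d.modify p.2 [] (fun g => g ++ [nmf p.1]))
      (PySem.Dict.empty) (PySem.List.enumerate X 0)).keys = PySem.Set.ofList X := by
    have h := PySem.Dict.keys_foldl_modify_key (PySem.List.enumerate X 0) (fun p => p.2)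
      ([] : List Int) (fun d p => fun g => g ++ [nmf p.1]) PySem.Dict.empty
    rw [pv_enum_map_snd X 0] at h
    exact h
  have hnd : (List.foldl (fun d (p : Int × List Int) => d.modify p.2 [] (fun g => g ++ [nmf p.1]))
      (PySem.Dict.empty) (PySem.List.enumerate X 0)).keys.Nodup :=
    PySem.Dict.nodup_keys_foldl_modify_key (PySem.List.enumerate X 0) (fun p => p.2)
      ([] : List Int) (fun d p => fun g => g ++ [nmf p.1]) PySem.Dict.empty List.nodup_nil
  have hget : ∀ (k : List Int),
      (List.foldl (fun d (p : Int × List Int) => d.modify p.2 [] (fun g => g ++ [nmf p.1]))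
        (PySem.Dict.empty) (PySem.List.enumerate X 0)).getD k [] = (pvIdxs X k).map nmf := by
    intro k
    have h1 : (List.foldl (fun d (p : Int × List Int) => d.modify p.2 [] (fun g => g ++ [nmf p.1]))
        (PySem.Dict.empty) (PySem.List.enumerate X 0))
        = List.foldl (fun d (q : List Int × Int) => d.modify q.1 [] (fun g => g ++ [q.2]))
            (PySem.Dict.empty) ((PySem.List.enumerate X 0).map (fun p => (p.2, nmf p.1))) := by
      rw [List.foldl_map]
    rw [h1, PySem.Dict.getD_foldl_modify_append]
    rw [List.filter_map, List.map_map]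
    exact pv_grp_bridge X nmf k
  have hitems : (List.foldl (fun d (p : Int × List Int) => d.modify p.2 [] (fun g => g ++ [nmf p.1]))
      (PySem.Dict.empty) (PySem.List.enumerate X 0)).items
      = (PySem.Set.ofList X).map (fun k => (k, (pvIdxs X k).map nmf)) := by
    rw [PySem.Dict.items_eq_map_keys _ hnd ([] : List Int), hkeys]
    apply List.map_congr_left
    intro k _
    rw [hget k]
  rw [hitems]
  have hperm : ((pvKeys X).map (fun k => (k, (pvIdxs X k).map nmf))).Perm
      ((PySem.Set.ofList X).map (fun k => (k, (pvIdxs X k).map nmf))) := by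
    apply List.Perm.map
    unfold pvKeys
    exact PySem.List.sorted_perm (PySem.Set.ofList X) (fun k => k) false
  have hsorted : PySem.List.sorted ((PySem.Set.ofList X).map (fun k => (k, (pvIdxs X k).map nmf)))
      (fun p => p.1)
      = (pvKeys X).map (fun k => (k, (pvIdxs X k).map nmf)) := by
    rw [pv_sorted_deceq]
    apply PySem.List.sorted_eq_of_perm_of_pairwise_lt _ _ _ hperm
    exact List.Pairwise.map _ (fun a b h => h) (pv_keys_pairwise X)
  rw [hsorted]
  unfold pvGroups
  rw [List.filter_map, List.map_map, List.filter_map]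
  rfl

theorem pv_B_eq_canon (X : List (List Int)) (names : Option (List Int)) :
    duplicate_patterns_alt X names = pvGroups X (pvNm names) (pvKeys X) := by
  cases names with
  | none =>
    unfold duplicate_patterns_alt
    exact pv_B_main X (fun i => i)
  | some ns =>
    unfold duplicate_patterns_alt
    exact pv_B_main X (fun i => PySem.List.pyGetD ns i 0)

-- ===== VERDICT (by name: the statement is the Claim_ definition above) =====
theorem duplicate_patterns_spec : Claim_equal_duplicate_patterns := by
  intro X names _ _
  show duplicate_patterns X names = duplicate_patterns_alt X names
  rw [pv_A_eq_canon, pv_B_eq_canon]
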